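-- pv_equiv track=rewrite | github.com/enchantedcostumes-debug/Hebrew-Gematria | psalms_analyzer.py | find_sacred_sequences
-- ===== SOURCE A (Python) =====
-- from typing import List, Dict, Tuple, Optional
--
-- def find_sacred_sequences(values: List[int]) -> Dict:
--     """Find sacred number sequences."""
--     sacred_nums = [3, 7, 12, 22, 40, 50, 70, 72, 144, 288, 432, 777]
--     sequences = {}
--
--     for num in sacred_nums:
--         positions = [i for i, val in enumerate(values) if val == num]
--         if positions:
--             sequences[num] = positions
--
--     return sequences
-- ===== SOURCE B (Python) =====
-- def find_sacred_sequences(values):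
--     """Find sacred number sequences."""
--     sacred_nums = [3, 7, 12, 22, 40, 50, 70, 72, 144, 288, 432, 777]
--     index = {}
--     for i, val in enumerate(values):
--         index.setdefault(val, []).append(i)
--     return {num: index[num] for num in sacred_nums if num in index}
-- ===== Notes on version B (the rewrite author's own statement) =====
-- stated objective: faster
-- what changed: Instead of scanning the whole list once per sacred number (12 passes), B makes a single enumerate pass building a value-to-positions index dict, then emits entries in sacred_nums order for the numbers present.
import Mathlib
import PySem

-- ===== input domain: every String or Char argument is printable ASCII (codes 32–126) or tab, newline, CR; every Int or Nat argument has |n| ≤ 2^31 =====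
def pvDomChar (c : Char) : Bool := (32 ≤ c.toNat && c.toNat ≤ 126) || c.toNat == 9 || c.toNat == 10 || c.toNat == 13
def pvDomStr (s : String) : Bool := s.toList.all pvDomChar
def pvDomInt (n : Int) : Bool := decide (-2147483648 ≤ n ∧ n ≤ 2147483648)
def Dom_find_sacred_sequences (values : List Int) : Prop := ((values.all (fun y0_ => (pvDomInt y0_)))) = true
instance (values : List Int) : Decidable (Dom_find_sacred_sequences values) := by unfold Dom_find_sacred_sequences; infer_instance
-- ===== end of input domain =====

-- B replaces A's 12 whole-list scans (one scan per sacred number) by a single enumerate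
-- pass building a value→positions index dict, then reads the sacred numbers off the index.

-- ===== PORT A =====
def find_sacred_sequences (values : List Int) : List (Int × List Int) :=
  ((([3, 7, 12, 22, 40, 50, 70, 72, 144, 288, 432, 777] : List Int).foldl
    (fun seqs num =>
      let positions := (PySem.List.enumerate values).filterMap
        (fun p => if p.2 = num then some p.1 else none)
      if positions ≠ [] then seqs.insert num positions else seqs)
    PySem.Dict.empty).items)

-- ===== PORT B =====
def find_sacred_sequences_alt (values : List Int) : List (Int × List Int) :=
  let index : PySem.Dict Int (List Int) :=
    (PySem.List.enumerate values).foldl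
      (fun d p => d.modify p.2 [] (· ++ [p.1])) PySem.Dict.empty
  ((([3, 7, 12, 22, 40, 50, 70, 72, 144, 288, 432, 777] : List Int).foldl
    (fun res num =>
      if index.contains num then res.insert num (index.getD num []) else res)
    PySem.Dict.empty).items)

-- ===== PRECONDITION & SPEC =====
def Spec_find_sacred_sequences (values : List Int) (out : List (Int × List Int)) : Prop := out = find_sacred_sequences_alt values
instance (values : List Int) (out : List (Int × List Int)) : Decidable (Spec_find_sacred_sequences values out) := by unfold Spec_find_sacred_sequences; infer_instance

-- ===== CLAIM (what is proved, stated in full; the proofs are below) =====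
def Claim_equal_find_sacred_sequences : Prop := ∀ (values : List Int), Dom_find_sacred_sequences values → Spec_find_sacred_sequences values (find_sacred_sequences values)

-- ===== LEMMAS AND PROOFS =====

-- a value occurs in xs iff it is the second component of some enumerate pair
theorem pv_mem_snd_enumerate (xs : List Int) (s num : Int) :
    num ∈ xs ↔ ∃ x, (x, num) ∈ PySem.List.enumerate xs s := by
  induction xs generalizing s with
  | nil => simp [PySem.List.enumerate_nil]
  | cons a xs ih =>
    simp only [PySem.List.enumerate_cons, List.mem_cons, Prod.mk.injEq]
    constructor
    · rintro (rfl | h)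
      · exact ⟨s, Or.inl ⟨rfl, rfl⟩⟩
      · obtain ⟨x, hx⟩ := (ih (s + 1)).mp h
        exact ⟨x, Or.inr hx⟩
    · rintro ⟨x, ⟨-, rfl⟩ | h⟩
      · exact Or.inl rfl
      · exact Or.inr ((ih (s + 1)).mpr ⟨x, h⟩)

-- B's index lookup at num returns exactly A's positions list for num
theorem pv_index_getD (values : List Int) (num : Int) :
    ((PySem.List.enumerate values).foldl
      (fun d p => d.modify p.2 [] (· ++ [p.1])) PySem.Dict.empty).getD num []
      = (PySem.List.enumerate values).filterMap
          (fun p => if p.2 = num then some p.1 else none) := by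
  have hswap : (PySem.List.enumerate values).foldl
      (fun d p => d.modify p.2 [] (· ++ [p.1])) (PySem.Dict.empty : PySem.Dict Int (List Int))
      = (((PySem.List.enumerate values).map (fun p => (p.2, p.1))).foldl
          (fun d p => d.modify p.1 [] (· ++ [p.2])) PySem.Dict.empty) := by
    rw [List.foldl_map]
  have hguard : (PySem.List.enumerate values).filterMap
          (fun p => if p.2 = num then some p.1 else none)
      = ((PySem.List.enumerate values).filter (fun p => p.2 == num)).map (·.1) := by
    induction (PySem.List.enumerate values) with
    | nil => rfl
    | cons p l ih => by_cases h : p.2 = num <;> simp [h, ih]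
  rw [hswap, PySem.Dict.getD_foldl_modify_append, hguard]
  simp [List.filter_map, List.map_map, Function.comp_def]

-- B's membership test at num holds exactly when A's positions list for num is nonempty
theorem pv_index_contains (values : List Int) (num : Int) :
    (((PySem.List.enumerate values).foldl
      (fun d p => d.modify p.2 [] (· ++ [p.1])) PySem.Dict.empty : PySem.Dict Int (List Int)).contains num = true)
      ↔ (PySem.List.enumerate values).filterMap
          (fun p => if p.2 = num then some p.1 else none) ≠ [] := by
  rw [PySem.Dict.contains_iff_mem_keys, PySem.Dict.keys_foldl_modify_key]
  simp only [PySem.Dict.keys_empty, PySem.Set.update_nil_left, PySem.Set.mem_ofList,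
    PySem.List.map_snd_enumerate]
  rw [pv_mem_snd_enumerate values 0 num]
  simp only [ne_eq, List.filterMap_eq_nil_iff, not_forall]
  constructor
  · rintro ⟨x, hx⟩
    exact ⟨(x, num), hx, by simp⟩
  · rintro ⟨⟨i, v⟩, hp, he⟩
    have hv : v = num := by by_contra hne; simp [hne] at he
    exact ⟨i, hv ▸ hp⟩

-- ===== VERDICT (by name: the statement is the Claim_ definition above) =====
theorem find_sacred_sequences_spec : Claim_equal_find_sacred_sequences := by
  intro values _
  unfold Spec_find_sacred_sequences find_sacred_sequences find_sacred_sequences_alt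
  simp only []
  have hstep : (fun (seqs : PySem.Dict Int (List Int)) (num : Int) =>
      if (PySem.List.enumerate values).filterMap (fun p => if p.2 = num then some p.1 else none) ≠ [] then
        seqs.insert num ((PySem.List.enumerate values).filterMap (fun p => if p.2 = num then some p.1 else none))
      else seqs)
    = (fun (res : PySem.Dict Int (List Int)) (num : Int) =>
      if ((PySem.List.enumerate values).foldl (fun d p => d.modify p.2 [] (· ++ [p.1])) PySem.Dict.empty : PySem.Dict Int (List Int)).contains num = true then
        res.insert num (((PySem.List.enumerate values).foldl (fun d p => d.modify p.2 [] (· ++ [p.1])) PySem.Dict.empty).getD num [])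
      else res) := by
    funext d num
    by_cases h : (PySem.List.enumerate values).filterMap
        (fun p => if p.2 = num then some p.1 else none) = []
    · have hc : (((PySem.List.enumerate values).foldl
          (fun d p => d.modify p.2 [] (· ++ [p.1])) PySem.Dict.empty : PySem.Dict Int (List Int)).contains num) = false := by
        by_contra hb
        exact (pv_index_contains values num).mp (by revert hb; cases (((PySem.List.enumerate values).foldl (fun d p => d.modify p.2 [] (· ++ [p.1])) PySem.Dict.empty : PySem.Dict Int (List Int)).contains num) <;> simp) h
      simp [h, hc]
    · have hc := (pv_index_contains values num).mpr h
      simp [h, hc, pv_index_getD]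
  rw [hstep]
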